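-- pv_equiv track=rewrite | github.com/aleksaa01/codefights | Challenges/powersOfPrime23.py | powersOfPrime23
-- ===== SOURCE A (Python) =====
-- def powersOfPrime23(p):
--     n = 31
--     m = 31
--     for i in range(30):
--         for j in range(30):
--             if abs(2 ** i - 3 ** j) == p and i < n:
--                 n, m = i, j
--                 return [n, m]
--
--     return []
-- ===== SOURCE B (Python) =====
-- def powersOfPrime23(p):
--     if p < 0:
--         return []
--     pow3 = {3 ** j: j for j in range(30)}
--     for i in range(30):
--         v = 2 ** i
--         for cand in (v - p, v + p):
--             if cand in pow3:
--                 return [i, pow3[cand]]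
--     return []
-- ===== Notes on version B (the rewrite author's own statement) =====
-- stated objective: alternative
-- what changed: Replaced the nested scan over all exponent pairs by a precomputed dict mapping each power of three to its exponent; per outer exponent only the two possible candidates (v minus p, then v plus p, in that order to keep the original smallest-second-exponent tie-break) are looked up.
import Mathlib
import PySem

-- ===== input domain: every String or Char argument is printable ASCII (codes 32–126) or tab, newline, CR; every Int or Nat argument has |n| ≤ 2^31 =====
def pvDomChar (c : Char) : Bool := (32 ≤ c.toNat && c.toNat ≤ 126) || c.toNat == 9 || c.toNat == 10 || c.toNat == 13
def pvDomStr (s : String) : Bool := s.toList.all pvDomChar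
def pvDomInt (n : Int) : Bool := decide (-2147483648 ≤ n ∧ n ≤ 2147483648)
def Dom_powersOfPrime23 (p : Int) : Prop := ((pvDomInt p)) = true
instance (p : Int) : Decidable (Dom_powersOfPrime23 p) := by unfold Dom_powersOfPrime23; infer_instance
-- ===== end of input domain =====

-- B replaces A's nested scan over exponent pairs by a precomputed power-of-three dict and two lookups (v minus p, then v plus p) per outer exponent; same return value everywhere.

-- ===== PORT A =====
-- inner 'for j in range(30)': first j with |2^i - 3^j| = p (and i < n, where n stays 31)
def pvAInner (p : Int) (i : Nat) : List Nat → Option (List Int)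
  | [] => none
  | j :: rest =>
    if |(2:Int)^i - 3^j| = p ∧ (i : Int) < 31 then some [(i : Int), (j : Int)]
    else pvAInner p i rest

-- outer 'for i in range(30)', returning [] when no pair matches
def pvAOuter (p : Int) : List Nat → List Int
  | [] => []
  | i :: rest =>
    match pvAInner p i (List.range 30) with
    | some r => r
    | none => pvAOuter p rest

def powersOfPrime23 (p : Int) : List Int := pvAOuter p (List.range 30)

-- ===== PORT B =====
-- pow3 = {3**j: j for j in range(30)}
def pvPow3 : PySem.Dict Int Int :=
  (List.range 30).foldl (fun d (j : ℕ) => d.insert ((3:Int)^j) (j : Int)) PySem.Dict.empty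

-- 'for cand in (v - p, v + p): if cand in pow3: return [i, pow3[cand]]'
def pvBInner (i : Nat) : List Int → Option (List Int)
  | [] => none
  | c :: rest =>
    match pvPow3.get? c with
    | some j => some [(i : Int), j]
    | none => pvBInner i rest

def pvBOuter (p : Int) : List Nat → List Int
  | [] => []
  | i :: rest =>
    match pvBInner i [(2:Int)^i - p, (2:Int)^i + p] with
    | some r => r
    | none => pvBOuter p rest

def powersOfPrime23_alt (p : Int) : List Int :=
  if p < 0 then [] else pvBOuter p (List.range 30)

-- ===== PRECONDITION & SPEC =====
def Spec_powersOfPrime23 (p : Int) (out : List Int) : Prop := out = powersOfPrime23_alt p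
instance (p : Int) (out : List Int) : Decidable (Spec_powersOfPrime23 p out) := by unfold Spec_powersOfPrime23; infer_instance

-- ===== CLAIM (what is proved, stated in full; the proofs are below) =====
def Claim_equal_powersOfPrime23 : Prop := ∀ (p : Int), Dom_powersOfPrime23 p → Spec_powersOfPrime23 p (powersOfPrime23 p)

-- ===== LEMMAS AND PROOFS =====

-- first j in the list with 3^j = x (the dict lookup, as a scan)
def pvScan3 (x : Int) : List Nat → Option Int
  | [] => none
  | j :: rest => if (3:Int)^j = x then some (j : Int) else pvScan3 x rest

theorem pvPow3_items : pvPow3.items = (List.range 30).map (fun (j : ℕ) => ((3:Int)^j, (j : Int))) := by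
  unfold pvPow3
  rw [PySem.Dict.items_foldl_insert_fresh]
  · simp [PySem.Dict.empty]
  · intro a _; simp [PySem.Dict.empty, PySem.Dict.contains]
  · refine List.Nodup.map ?_ List.nodup_range
    intro a b h
    by_contra hne
    rcases Nat.lt_or_ge a b with hlt | hge
    · exact absurd h (ne_of_lt (pow_lt_pow_right₀ (by norm_num) hlt))
    · have hlt : b < a := Nat.lt_of_le_of_ne hge (fun e => hne e.symm)
      exact absurd h.symm (ne_of_lt (pow_lt_pow_right₀ (by norm_num) hlt))

theorem pvGet?_mk_map (x : Int) (l : List Nat) :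
    (PySem.Dict.mk (l.map (fun (j : ℕ) => ((3:Int)^j, (j : Int))))).get? x = pvScan3 x l := by
  induction l with
  | nil => simp [pvScan3, PySem.Dict.get?]
  | cons j rest ih =>
    simp only [List.map_cons, PySem.Dict.get?_mk_cons, pvScan3, beq_iff_eq]
    split <;> simp_all

theorem pvPow3_get (x : Int) : pvPow3.get? x = pvScan3 x (List.range 30) := by
  have : pvPow3 = PySem.Dict.mk ((List.range 30).map (fun (j : ℕ) => ((3:Int)^j, (j : Int)))) := by
    apply PySem.Dict.ext; rw [pvPow3_items]
  rw [this, pvGet?_mk_map]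

theorem pvScan3_eq_some (x : Int) (l : List Nat) (j : Int) (h : pvScan3 x l = some j) :
    ∃ m, m ∈ l ∧ (3:Int)^m = x ∧ j = (m : Int) := by
  induction l with
  | nil => simp [pvScan3] at h
  | cons a rest ih =>
    simp only [pvScan3] at h
    split at h
    · exact ⟨a, by simp_all⟩
    · obtain ⟨m, hm, h3, hj⟩ := ih h
      exact ⟨m, List.mem_cons_of_mem _ hm, h3, hj⟩

theorem pvAInner_neg (p : Int) (hp : p < 0) (i : Nat) (l : List Nat) :
    pvAInner p i l = none := by
  induction l with
  | nil => rfl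
  | cons j rest ih =>
    simp only [pvAInner, ih]
    have : ¬ (|(2:Int)^i - 3^j| = p ∧ (i : Int) < 31) := by
      rintro ⟨h, -⟩; have := abs_nonneg ((2:Int)^i - 3^j); omega
    rw [if_neg this]

theorem pvAOuter_neg (p : Int) (hp : p < 0) (l : List Nat) : pvAOuter p l = [] := by
  induction l with
  | nil => rfl
  | cons i rest ih => simp [pvAOuter, pvAInner_neg p hp i, ih]

-- the heart: for one i, A's inner scan = check v-p first, then v+p
theorem pvInner_eq (p : Int) (hp : 0 ≤ p) (i : Nat) (hi : (i : Int) < 31) (n : Nat) :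
    pvAInner p i (List.range n) =
      match pvScan3 ((2:Int)^i - p) (List.range n) with
      | some j => some [(i : Int), j]
      | none =>
        match pvScan3 ((2:Int)^i + p) (List.range n) with
        | some j => some [(i : Int), j]
        | none => none := by
  induction n with
  | zero => rfl
  | succ n ih =>
    have hA : ∀ l1 l2, pvAInner p i (l1 ++ l2) =
        match pvAInner p i l1 with
        | some r => some r
        | none => pvAInner p i l2 := by
      intro l1 l2
      induction l1 with
      | nil => rfl
      | cons a r ih2 => simp only [List.cons_append, pvAInner]; split <;> simp [ih2]
    have hS : ∀ x l1 l2, pvScan3 x (l1 ++ l2) =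
        match pvScan3 x l1 with
        | some r => some r
        | none => pvScan3 x l2 := by
      intro x l1 l2
      induction l1 with
      | nil => rfl
      | cons a r ih2 => simp only [List.cons_append, pvScan3]; split <;> simp [ih2]
    rw [List.range_succ, hA, hS, hS, ih]
    rcases h1 : pvScan3 ((2:Int)^i - p) (List.range n) with _ | j1
    · rcases h2 : pvScan3 ((2:Int)^i + p) (List.range n) with _ | j2
      · -- nothing found below n: compare the single element n
        simp only [pvAInner, pvScan3]
        by_cases c1 : (3:Int)^n = (2:Int)^i - p
        · have hcond : |(2:Int)^i - 3^n| = p ∧ (i : Int) < 31 := by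
            refine ⟨?_, hi⟩
            rw [c1]
            have h2 : (2:Int)^i - ((2:Int)^i - p) = p := by ring
            rw [h2, abs_of_nonneg hp]
          rw [if_pos hcond, if_pos c1]
        · by_cases c2 : (3:Int)^n = (2:Int)^i + p
          · have hcond : |(2:Int)^i - 3^n| = p ∧ (i : Int) < 31 := by
              refine ⟨?_, hi⟩
              rw [c2]
              have h2 : (2:Int)^i - ((2:Int)^i + p) = -p := by ring
              rw [h2, abs_neg, abs_of_nonneg hp]
            rw [if_pos hcond, if_neg c1, if_pos c2]
          · have hcond : ¬ (|(2:Int)^i - 3^n| = p ∧ (i : Int) < 31) := by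
              rintro ⟨h, -⟩
              rcases abs_cases ((2:Int)^i - 3^n) with ⟨he, -⟩ | ⟨he, -⟩
              · exact c1 (by omega)
              · exact c2 (by omega)
            rw [if_neg hcond, if_neg c1, if_neg c2]
      · -- v+p found at j2 < n, and v-p not found below n nor at n
        have hn1 : (3:Int)^n ≠ (2:Int)^i - p := by
          obtain ⟨m, hm, h3, -⟩ := pvScan3_eq_some _ _ _ h2
          intro hc
          have hmn : (3:Int)^n ≤ (3:Int)^m := by omega
          have : n ≤ m := (pow_le_pow_iff_right₀ (by norm_num : (1:Int) < 3)).mp hmn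
          have : m < n := List.mem_range.mp hm
          omega
        simp [pvScan3, hn1]
    · simp

theorem pvOuter_eq (p : Int) (hp : 0 ≤ p) (l : List Nat) (hl : ∀ i ∈ l, i < 30) :
    pvAOuter p l = pvBOuter p l := by
  induction l with
  | nil => rfl
  | cons i rest ih =>
    have hi : (i : Int) < 31 := by
      have := hl i (List.mem_cons_self ..); omega
    have hrest : ∀ j ∈ rest, j < 30 := fun j hj => hl j (List.mem_cons_of_mem _ hj)
    simp only [pvAOuter, pvBOuter, pvBInner, pvPow3_get, pvInner_eq p hp i hi 30]
    rcases pvScan3 ((2:Int)^i - p) (List.range 30) with _ | j1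
    · rcases pvScan3 ((2:Int)^i + p) (List.range 30) with _ | j2
      · simpa [pvBInner] using ih hrest
      · rfl
    · rfl

-- ===== VERDICT (by name: the statement is the Claim_ definition above) =====
theorem powersOfPrime23_spec : Claim_equal_powersOfPrime23 := by
  intro p _
  unfold Spec_powersOfPrime23 powersOfPrime23 powersOfPrime23_alt
  by_cases hp : p < 0
  · simp [hp, pvAOuter_neg p hp]
  · rw [if_neg hp]
    exact pvOuter_eq p (not_lt.mp hp) _ (fun i hi => List.mem_range.mp hi)
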